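-- pv_equiv track=rewrite | github.com/7Beeai/stratus-sdk | src/utils/base.py | validate_icao_code
-- ===== SOURCE A (Python) =====
-- def validate_icao_code(icao_code: str) -> bool:
--     """
--     Validar código ICAO.
--
--     Args:
--         icao_code: Código ICAO a ser validado
--
--     Returns:
--         True se válido, False caso contrário
--     """
--     if not icao_code:
--         return False
--
--     # Códigos ICAO têm 4 letras
--     if len(icao_code) != 4:
--         return False
--
--     # Apenas letras maiúsculas
--     if not icao_code.isalpha() or not icao_code.isupper():
--         return False
--
--     # Códigos brasileiros começam com SB
--     if icao_code.startswith('SB'):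
--         return True
--
--     # Outros códigos válidos (pode ser expandido)
--     valid_prefixes = ['SB', 'SA', 'SC', 'SD', 'SE', 'SF', 'SG', 'SH', 'SI', 'SJ', 'SK', 'SL', 'SM', 'SN', 'SO', 'SP', 'SQ', 'SR', 'SS', 'ST', 'SU', 'SV', 'SW', 'SX', 'SY', 'SZ']
--     return any(icao_code.startswith(prefix) for prefix in valid_prefixes)
-- ===== SOURCE B (Python) =====
-- def validate_icao_code(icao_code: str) -> bool:
--     """Valid iff: 4 chars, all uppercase letters, first char 'S'.
--
--     The 26-entry prefix table of A is exactly 'S' followed by every letter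
--     A-Z, so after the alpha/upper check it collapses to a first-char test.
--     """
--     return (len(icao_code) == 4
--             and icao_code.isalpha()
--             and icao_code.isupper()
--             and icao_code.startswith('S'))
-- ===== Notes on version B (the rewrite author's own statement) =====
-- stated objective: simpler
-- what changed: Replaced A's guard-clause chain plus a scan over the constructed 26-entry prefix table with a single conjunction ending in a one-character first-letter test: since the code is already known to be 4 uppercase letters, the table (which covers every second letter A-Z) collapses to checking that the code begins with the letter S.
import Mathlib
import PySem

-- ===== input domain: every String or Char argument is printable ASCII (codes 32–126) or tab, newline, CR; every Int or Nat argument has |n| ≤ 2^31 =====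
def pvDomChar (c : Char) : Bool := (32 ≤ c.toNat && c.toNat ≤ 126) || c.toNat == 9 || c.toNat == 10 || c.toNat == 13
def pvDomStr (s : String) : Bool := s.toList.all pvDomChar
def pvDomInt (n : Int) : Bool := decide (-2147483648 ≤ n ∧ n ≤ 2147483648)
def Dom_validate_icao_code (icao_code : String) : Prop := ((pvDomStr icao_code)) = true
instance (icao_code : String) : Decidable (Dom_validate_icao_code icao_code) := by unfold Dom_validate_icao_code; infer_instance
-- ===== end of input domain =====

-- B replaces A's guard-clause chain plus its scan over a constructed 26-entry prefix table
-- with a single conjunction ending in a one-character first-letter test (objective: simpler).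


-- Python's str.isupper() (at least one cased char, all cased chars uppercase);
-- exact on ASCII, where the cased characters are exactly the letters.
def pyStrIsupper (s : String) : Bool :=
  s.toList.any PySem.Chars.isalpha && s.toList.all (fun c => !PySem.Chars.islower c)

-- ===== PORT A =====
def validate_icao_code (icao_code : String) : Bool :=
  if PySem.Str.len icao_code == 0 then false
  else if PySem.Str.len icao_code != 4 then false
  else if !PySem.Str.strIsalpha icao_code || !pyStrIsupper icao_code then false
  else if PySem.Str.startswith icao_code "SB" then true
  else
    (["SB", "SA", "SC", "SD", "SE", "SF", "SG", "SH", "SI", "SJ", "SK", "SL",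
      "SM", "SN", "SO", "SP", "SQ", "SR", "SS", "ST", "SU", "SV", "SW", "SX",
      "SY", "SZ"]).any (fun pfx => PySem.Str.startswith icao_code pfx)

-- ===== PORT B =====
def validate_icao_code_alt (icao_code : String) : Bool :=
  PySem.Str.len icao_code == 4
    && PySem.Str.strIsalpha icao_code
    && pyStrIsupper icao_code
    && PySem.Str.startswith icao_code "S"

-- ===== PRECONDITION & SPEC =====
def Spec_validate_icao_code (icao_code : String) (out : Bool) : Prop := out = validate_icao_code_alt icao_code
instance (icao_code : String) (out : Bool) : Decidable (Spec_validate_icao_code icao_code out) := by unfold Spec_validate_icao_code; infer_instance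

-- ===== CLAIM (what is proved, stated in full; the proofs are below) =====
def Claim_equal_validate_icao_code : Prop := ∀ (icao_code : String), Dom_validate_icao_code icao_code → Spec_validate_icao_code icao_code (validate_icao_code icao_code)

-- ===== LEMMAS AND PROOFS =====

-- An uppercase ASCII letter (alpha and not lowercase) is one of the 26 letters A..Z.
theorem upper_char_cases (b : Char) (hal : PySem.Chars.isalpha b = true)
    (hlo : PySem.Chars.islower b = false) :
    b ∈ ['A','B','C','D','E','F','G','H','I','J','K','L','M',
         'N','O','P','Q','R','S','T','U','V','W','X','Y','Z'] := by
  have hup : PySem.Chars.isupper b = true := by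
    simp only [PySem.Chars.isalpha, Bool.or_eq_true] at hal
    rcases hal with h | h
    · exact h
    · simp [h] at hlo
  simp only [PySem.Chars.isupper, Bool.and_eq_true, decide_eq_true_eq, Char.le_def] at hup
  obtain ⟨h1, h2⟩ := hup
  have hb : b = Char.ofNat b.toNat := (Char.ofNat_toNat b).symm
  have h1' : 65 ≤ b.toNat := h1
  have h2' : b.toNat ≤ 90 := h2
  interval_cases h : b.toNat <;> simp_all

theorem validate_eq_alt (s : String) : validate_icao_code s = validate_icao_code_alt s := by
  unfold validate_icao_code validate_icao_code_alt
  rcases hcs : s.toList with _ | ⟨a, _ | ⟨b, _ | ⟨c, _ | ⟨d, _ | ⟨e, rest⟩⟩⟩⟩⟩ <;>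
    simp only [PySem.Str.len, PySem.Str.strIsalpha, PySem.Str.startswith, pyStrIsupper, hcs] <;>
    try simp
  · -- length exactly 4
    by_cases hal : PySem.Chars.strIsalpha [a, b, c, d] = true
    case neg =>
      rw [Bool.not_eq_true] at hal
      simp [hal]
    have ⟨ha1, hb1, hc1, hd1⟩ : PySem.Chars.isalpha a = true ∧ PySem.Chars.isalpha b = true ∧
        PySem.Chars.isalpha c = true ∧ PySem.Chars.isalpha d = true := by
      simpa [PySem.Chars.strIsalpha] using hal
    by_cases hlo : PySem.Chars.islower b = true
    · -- second char lowercase: the isupper conjunct is false on both sides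
      simp [ha1, hlo, PySem.Chars.strIsalpha]
    · rw [Bool.not_eq_true] at hlo
      by_cases haS : a = 'S'
      · subst haS
        have hmem := upper_char_cases b hb1 hlo
        fin_cases hmem <;> simp [PySem.Chars.startswith, List.isPrefixOf, hal, ha1]
      · have hne : ('S' == a) = false := by
          simp only [beq_eq_false_iff_ne, ne_eq]
          exact fun h => haS h.symm
        simp [PySem.Chars.startswith, List.isPrefixOf, hne]
  · -- length ≥ 5
    have h5 : ¬((List.length rest : Int) + 1 + 1 + 1 + 1 + 1 = 4) := by omega
    simp [h5]

-- ===== VERDICT (by name: the statement is the Claim_ definition above) =====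
theorem validate_icao_code_spec : Claim_equal_validate_icao_code := by
  intro s _
  unfold Spec_validate_icao_code
  exact validate_eq_alt s
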